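-- pv_equiv track=rewrite | github.com/rathirahul86-cmyk/first_CB | job_agent/notifier.py | _render_plain
-- ===== SOURCE A (Python) =====
-- from collections import defaultdict
--
-- def _group_by_company(jobs: list[dict]) -> dict[str, list[dict]]:
--     grouped = defaultdict(list)
--     for job in jobs:
--         grouped[job["company"]].append(job)
--     return dict(sorted(grouped.items()))
--
-- def _render_plain(jobs: list[dict], run_time: str) -> str:
--     grouped = _group_by_company(jobs)
--     lines = [
--         f"TPM Job Digest — {run_time} UTC — {len(jobs)} new role(s)",
--         "=" * 60,
--         "",
--     ]
--     for company, company_jobs in grouped.items():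
--         lines.append(f"[{company}] — {len(company_jobs)} role(s)")
--         for j in company_jobs:
--             lines.append(f"  {j['title']}")
--             lines.append(f"  Location : {j.get('location') or 'Remote / Unspecified'}")
--             lines.append(f"  Apply    : {j['url']}")
--             lines.append("")
--         lines.append("")
--     return "\n".join(lines)
-- ===== SOURCE B (Python) =====
-- def _job_lines(j):
--     return [
--         f"  {j['title']}",
--         f"  Location : {j.get('location') or 'Remote / Unspecified'}",
--         f"  Apply    : {j['url']}",
--         "",
--     ]
--
-- def _block(company, company_jobs):
--     return ([f"[{company}] — {len(company_jobs)} role(s)"]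
--             + [line for j in company_jobs for line in _job_lines(j)]
--             + [""])
--
-- def _render_plain(jobs: list[dict], run_time: str) -> str:
--     companies = sorted({j["company"] for j in jobs})
--     lines = (
--         [
--             f"TPM Job Digest — {run_time} UTC — {len(jobs)} new role(s)",
--             "=" * 60,
--             "",
--         ]
--         + [line for c in companies
--            for line in _block(c, [j for j in jobs if j["company"] == c])]
--     )
--     return "\n".join(lines)
-- ===== Notes on version B (the rewrite author's own statement) =====
-- stated objective: simpler
-- what changed: Replaces the defaultdict accumulation plus sorted(grouped.items()) with sorted distinct companies and a per-company filter of the original jobs list, and builds the body with comprehensions over small helpers instead of nested append loops.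
import Mathlib
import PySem

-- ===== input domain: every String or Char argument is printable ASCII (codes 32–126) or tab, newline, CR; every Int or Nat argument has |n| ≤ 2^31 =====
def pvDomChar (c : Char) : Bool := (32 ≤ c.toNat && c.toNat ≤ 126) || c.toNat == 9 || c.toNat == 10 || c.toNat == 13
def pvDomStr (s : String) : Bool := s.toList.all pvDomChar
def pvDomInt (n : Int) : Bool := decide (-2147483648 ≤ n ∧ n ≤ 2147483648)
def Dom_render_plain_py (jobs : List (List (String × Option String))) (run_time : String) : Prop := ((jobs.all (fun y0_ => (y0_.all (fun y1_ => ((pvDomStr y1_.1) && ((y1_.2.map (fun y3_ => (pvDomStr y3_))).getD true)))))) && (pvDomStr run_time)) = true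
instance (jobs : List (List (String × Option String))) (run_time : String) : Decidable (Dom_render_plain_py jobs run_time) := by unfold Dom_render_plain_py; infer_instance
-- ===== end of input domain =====

-- B replaces A's defaultdict accumulation + sorted(items) by sorted distinct companies with a
-- per-company filter of the original list (no dict index); same lines, byte-identical output.

-- Shared input decoding (the Python jobs are dicts; duplicate keys in the assoc list follow dict(pairs)):
-- job[k] / job.get(k)
def pvJget (job : List (String × Option String)) (k : String) : Option (Option String) :=
  (PySem.Dict.ofList job).get? k
-- f-string rendering of a dict value (str(None) = "None"); the 'none' (missing-key) case is
-- unreachable under Pre_render_plain_py (Python raises KeyError there)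
def pvShow (o : Option (Option String)) : String :=
  match o with
  | some (some s) => s
  | _ => "None"
-- j.get('location') or 'Remote / Unspecified'  (None, missing key and "" are all falsy)
def pvLoc (job : List (String × Option String)) : String :=
  match pvJget job "location" with
  | some (some s) => if s = "" then "Remote / Unspecified" else s
  | _ => "Remote / Unspecified"
-- the company grouping/sort key as the string it is rendered as; under Pre_render_plain_py the
-- company values are either all strings (key = the value itself) or all None (a single group),
-- so grouping and sorting by this key is exactly Python's grouping and sorting by job["company"]
def pvCompany (job : List (String × Option String)) : String :=
  pvShow (pvJget job "company")
def pvEq60 : String := "============================================================"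

-- ===== PORT A =====
def render_plain_py (jobs : List (List (String × Option String))) (run_time : String) : String :=
  -- grouped = _group_by_company(jobs): defaultdict(list) accumulation, then dict(sorted(grouped.items()))
  -- (dict keys are distinct, so Python's tuple comparison in sorted(...) only ever compares the keys)
  let grouped := jobs.foldl (fun d job => d.modify (pvCompany job) [] (fun x => x ++ [job])) PySem.Dict.empty
  let items := PySem.List.sorted grouped.items (fun p => p.1)
  let lines : List String :=
    ["TPM Job Digest — " ++ run_time ++ " UTC — " ++ PySem.Int.toStr (PySem.List.len jobs) ++ " new role(s)",
     pvEq60,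
     ""]
  let lines := items.foldl (fun lines p =>
    let lines := lines ++ ["[" ++ p.1 ++ "] — " ++ PySem.Int.toStr (PySem.List.len p.2) ++ " role(s)"]
    let lines := p.2.foldl (fun lines j =>
      lines ++ ["  " ++ pvShow (pvJget j "title"),
                "  Location : " ++ pvLoc j,
                "  Apply    : " ++ pvShow (pvJget j "url"),
                ""]) lines
    lines ++ [""]) lines
  PySem.Str.join "\n" lines

-- ===== PORT B =====
-- _job_lines(j)
def pvJobLines (j : List (String × Option String)) : List String :=
  ["  " ++ pvShow (pvJget j "title"),
   "  Location : " ++ pvLoc j,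
   "  Apply    : " ++ pvShow (pvJget j "url"),
   ""]
-- _block(company, company_jobs)
def pvBlock (company : String) (company_jobs : List (List (String × Option String))) : List String :=
  ("[" ++ company ++ "] — " ++ PySem.Int.toStr (PySem.List.len company_jobs) ++ " role(s)")
    :: (company_jobs.flatMap pvJobLines ++ [""])

def render_plain_py_alt (jobs : List (List (String × Option String))) (run_time : String) : String :=
  let companies := PySem.List.sorted (PySem.Set.ofList (jobs.map pvCompany)) (fun c => c)
  PySem.Str.join "\n"
    (["TPM Job Digest — " ++ run_time ++ " UTC — " ++ PySem.Int.toStr (PySem.List.len jobs) ++ " new role(s)",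
      pvEq60,
      ""]
     ++ companies.flatMap (fun c => pvBlock c (jobs.filter (fun j => pvCompany j == c))))

-- ===== PRECONDITION & SPEC =====
-- Pre_ excludes exactly the inputs on which the Python raises: a job missing the "company",
-- "title" or "url" key (KeyError in both A and B) and job lists mixing None and string company
-- values (TypeError in both A and B, from sorting str against None).
def Pre_render_plain_py (jobs : List (List (String × Option String))) (run_time : String) : Prop :=
  (∀ j ∈ jobs, (pvJget j "title").isSome = true ∧ (pvJget j "url").isSome = true) ∧
  ((∀ j ∈ jobs, ((pvJget j "company").bind (fun x => x)).isSome = true) ∨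
   (∀ j ∈ jobs, pvJget j "company" = some none))
instance (jobs : List (List (String × Option String))) (run_time : String) : Decidable (Pre_render_plain_py jobs run_time) := by unfold Pre_render_plain_py; infer_instance

def pvWitness_render_plain_py : (List (List (String × Option String))) × String :=
  ([[("company", some "B"), ("title", some "t1"), ("url", some "u1")],
    [("company", some "A"), ("title", none), ("url", some "u2"), ("location", some "X")]], "now")

def Spec_render_plain_py (jobs : List (List (String × Option String))) (run_time : String) (out : String) : Prop := out = render_plain_py_alt jobs run_time
instance (jobs : List (List (String × Option String))) (run_time : String) (out : String) : Decidable (Spec_render_plain_py jobs run_time out) := by unfold Spec_render_plain_py; infer_instance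

-- ===== CLAIM (what is proved, stated in full; the proofs are below) =====
def Claim_equal_render_plain_py : Prop := ∀ (jobs : List (List (String × Option String))) (run_time : String), Dom_render_plain_py jobs run_time → Pre_render_plain_py jobs run_time → Spec_render_plain_py jobs run_time (render_plain_py jobs run_time)

-- ===== LEMMAS AND PROOFS =====

-- A's grouped dict, read back per company, is B's per-company filter of the original list
theorem pv_grouped_getD (jobs : List (List (String × Option String))) (c : String) :
    (jobs.foldl (fun d job => d.modify (pvCompany job) [] (fun x => x ++ [job])) PySem.Dict.empty).getD c []
      = jobs.filter (fun j => pvCompany j == c) := by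
  have hm : jobs.foldl (fun d job => d.modify (pvCompany job) [] (fun x => x ++ [job])) PySem.Dict.empty
      = (jobs.map (fun j => (pvCompany j, j))).foldl (fun d p => d.modify p.1 [] (fun x => x ++ [p.2])) PySem.Dict.empty := by
    rw [List.foldl_map]
  rw [hm, PySem.Dict.getD_foldl_modify_append]
  simp [List.filter_map, Function.comp_def]

-- A's sorted(grouped.items()) is B's sorted distinct companies, each paired with its filtered jobs
theorem pv_sorted_items (jobs : List (List (String × Option String))) :
    PySem.List.sorted
        (jobs.foldl (fun d job => d.modify (pvCompany job) [] (fun x => x ++ [job])) PySem.Dict.empty).items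
        (fun p => p.1)
      = (PySem.List.sorted (PySem.Set.ofList (jobs.map pvCompany)) (fun c => c)).map
          (fun c => (c, jobs.filter (fun j => pvCompany j == c))) := by
  set grouped := jobs.foldl (fun d job => d.modify (pvCompany job) [] (fun x => x ++ [job])) PySem.Dict.empty with hg
  have hnd : grouped.keys.Nodup := by
    apply PySem.Dict.nodup_keys_foldl_modify_key jobs pvCompany [] (fun _ j => (fun x => x ++ [j]))
    simp
  have hkeys : grouped.keys = PySem.Set.ofList (jobs.map pvCompany) := by
    rw [hg, PySem.Dict.keys_foldl_modify_key jobs pvCompany [] (fun _ j => (fun x => x ++ [j]))]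
    simp [PySem.Set.update_nil_left]
  have hitems : grouped.items = grouped.keys.map (fun k => (k, grouped.getD k [])) :=
    PySem.Dict.items_eq_map_keys grouped hnd []
  apply PySem.List.sorted_eq_of_perm_of_pairwise_lt
  · -- permutation
    have hperm : (PySem.List.sorted (PySem.Set.ofList (jobs.map pvCompany)) (fun c => c)).Perm
        (PySem.Set.ofList (jobs.map pvCompany)) := PySem.List.sorted_perm _ _ _
    have := hperm.map (fun c => (c, jobs.filter (fun j => pvCompany j == c)))
    refine this.trans ?_
    rw [hitems, hkeys]
    apply List.Perm.of_eq
    apply List.map_congr_left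
    intro c _
    rw [pv_grouped_getD]
  · -- strictly increasing keys
    have := PySem.List.sorted_ofList_pairwise_lt (jobs.map pvCompany)
    exact List.Pairwise.map _ (by intro a b h; simpa using h) this

-- A's line-accumulating loop over the grouped items builds B's flatMap of blocks
theorem pv_lines_loop (l : List (String × List (List (String × Option String)))) (init : List String) :
    l.foldl (fun lines p =>
        let lines := lines ++ ["[" ++ p.1 ++ "] — " ++ PySem.Int.toStr (PySem.List.len p.2) ++ " role(s)"]
        let lines := p.2.foldl (fun lines j =>
          lines ++ ["  " ++ pvShow (pvJget j "title"),
                    "  Location : " ++ pvLoc j,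
                    "  Apply    : " ++ pvShow (pvJget j "url"),
                    ""]) lines
        lines ++ [""]) init
      = init ++ l.flatMap (fun p => pvBlock p.1 p.2) := by
  induction l generalizing init with
  | nil => simp
  | cons p t ih =>
    simp only [List.foldl_cons, List.flatMap_cons, ih]
    have hinner : ∀ (js : List (List (String × Option String))) (acc : List String),
        js.foldl (fun lines j =>
          lines ++ ["  " ++ pvShow (pvJget j "title"),
                    "  Location : " ++ pvLoc j,
                    "  Apply    : " ++ pvShow (pvJget j "url"),
                    ""]) acc = acc ++ js.flatMap pvJobLines := by
      intro js acc
      have := PySem.List.foldl_append_eq_flatMap pvJobLines js acc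
      simpa [pvJobLines] using this
    rw [hinner]
    simp [pvBlock]

-- ===== VERDICT (by name: the statement is the Claim_ definition above) =====
theorem render_plain_py_spec : Claim_equal_render_plain_py := by
  intro jobs _run_time _ _
  unfold Spec_render_plain_py render_plain_py render_plain_py_alt
  dsimp only
  rw [pv_sorted_items, pv_lines_loop]
  congr 1
  rw [List.flatMap_map]
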